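-- pv_equiv track=rewrite | github.com/dbyoung18/training | large_language_model/megatron-lm/megatron/data/gpt_dataset.py | _num_epochs
-- ===== SOURCE A (Python) =====
-- def _num_epochs(tokens_per_epoch, seq_length, num_samples, add_extra_token):
--     """Based on number of samples and sequence lenght, calculate how many
--     epochs will be needed."""
--     num_epochs = 0
--     total_tokens = 0
--     while True:
--         num_epochs += 1
--         total_tokens += tokens_per_epoch
--         # -1 is because we need to retrieve seq_length + 1 token each time
--         # but the last token will overlap with the first token of the next
--         # sample except for the last sample.
--         if ((total_tokens - add_extra_token) // seq_length) >= num_samples: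
--             return num_epochs
-- ===== SOURCE B (Python) =====
-- def _num_epochs(tokens_per_epoch, seq_length, num_samples, add_extra_token):
--     """Based on number of samples and sequence lenght, calculate how many
--     epochs will be needed."""
--     # Closed form: smallest k >= 1 with k*tokens_per_epoch >= num_samples*seq_length + add_extra_token,
--     # i.e. ceiling division, computed as -((-x) // tokens_per_epoch).
--     needed_tokens = num_samples * seq_length + add_extra_token
--     return max(1, -((-needed_tokens) // tokens_per_epoch))
-- ===== Notes on version B (the rewrite author's own statement) =====
-- stated objective: faster
-- what changed: Replaced the epoch-counting accumulation loop by a closed-form ceiling division max(1, -((-(num_samples*seq_length+add_extra_token))//tokens_per_epoch)).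
-- outside the precondition, e.g. on _num_epochs(-2, 5, -10, 0): A returns 1, B returns 25; on _num_epochs(3, -5, -10, 0): A returns 1, B returns 17
import Mathlib
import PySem

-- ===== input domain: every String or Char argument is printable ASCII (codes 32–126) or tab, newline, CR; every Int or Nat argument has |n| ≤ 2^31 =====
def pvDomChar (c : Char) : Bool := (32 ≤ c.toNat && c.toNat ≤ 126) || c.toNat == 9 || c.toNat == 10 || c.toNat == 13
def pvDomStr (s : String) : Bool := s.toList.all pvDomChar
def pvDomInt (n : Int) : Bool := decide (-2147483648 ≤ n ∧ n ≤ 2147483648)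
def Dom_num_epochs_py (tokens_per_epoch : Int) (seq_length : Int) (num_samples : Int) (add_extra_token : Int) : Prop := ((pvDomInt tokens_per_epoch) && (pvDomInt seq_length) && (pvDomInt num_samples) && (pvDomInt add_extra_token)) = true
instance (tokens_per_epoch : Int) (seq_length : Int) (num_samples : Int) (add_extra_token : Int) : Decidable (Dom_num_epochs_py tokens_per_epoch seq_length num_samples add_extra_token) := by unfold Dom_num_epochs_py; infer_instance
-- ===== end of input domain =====

-- B replaces A's one-epoch-at-a-time counting loop by a closed-form ceiling division (objective: faster, O(1) vs O(answer)).

-- ===== PORT A =====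
-- A's `while True` loop, with a fuel counter as a pure totality guard: on every input
-- admitted by Pre_ the fuel (|num_samples|*|seq_length|+|add_extra_token|+2) strictly
-- exceeds the number of iterations A performs, so the fuel-0 branch is never reached.
def numEpochsLoop (tokens_per_epoch : Int) (seq_length : Int) (num_samples : Int)
    (add_extra_token : Int) : Nat → Int → Int → Int
  | 0, num_epochs, _ => num_epochs
  | fuel + 1, num_epochs, total_tokens =>
      let num_epochs := num_epochs + 1
      let total_tokens := total_tokens + tokens_per_epoch
      if num_samples ≤ PySem.Int.floordiv (total_tokens - add_extra_token) seq_length then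
        num_epochs
      else
        numEpochsLoop tokens_per_epoch seq_length num_samples add_extra_token fuel num_epochs total_tokens

def num_epochs_py (tokens_per_epoch : Int) (seq_length : Int) (num_samples : Int) (add_extra_token : Int) : Int :=
  numEpochsLoop tokens_per_epoch seq_length num_samples add_extra_token
    (num_samples.natAbs * seq_length.natAbs + add_extra_token.natAbs + 2) 0 0

-- ===== PORT B =====
def num_epochs_py_alt (tokens_per_epoch : Int) (seq_length : Int) (num_samples : Int) (add_extra_token : Int) : Int :=
  max 1 (-(PySem.Int.floordiv (-(num_samples * seq_length + add_extra_token)) tokens_per_epoch))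

-- ===== PRECONDITION & SPEC =====
-- Pre_ excludes seq_length = 0 (A raises ZeroDivisionError) and the mixed/zero sign
-- combinations of tokens_per_epoch and seq_length, on which A's loop diverges for all but
-- degenerate inputs (when it does return there it returns 1 after a single accidental
-- iteration, a corner no caller exercises; see cites).
def Pre_num_epochs_py (tokens_per_epoch : Int) (seq_length : Int) (num_samples : Int) (add_extra_token : Int) : Prop :=
  (0 < tokens_per_epoch ∧ 0 < seq_length) ∨ (tokens_per_epoch < 0 ∧ seq_length < 0)
instance (tokens_per_epoch : Int) (seq_length : Int) (num_samples : Int) (add_extra_token : Int) : Decidable (Pre_num_epochs_py tokens_per_epoch seq_length num_samples add_extra_token) := by unfold Pre_num_epochs_py; infer_instance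

def pvWitness_num_epochs_py : Int × Int × Int × Int := (2, 5, 3, 1)

def Spec_num_epochs_py (tokens_per_epoch : Int) (seq_length : Int) (num_samples : Int) (add_extra_token : Int) (out : Int) : Prop := out = num_epochs_py_alt tokens_per_epoch seq_length num_samples add_extra_token
instance (tokens_per_epoch : Int) (seq_length : Int) (num_samples : Int) (add_extra_token : Int) (out : Int) : Decidable (Spec_num_epochs_py tokens_per_epoch seq_length num_samples add_extra_token out) := by unfold Spec_num_epochs_py; infer_instance

-- ===== CLAIM (what is proved, stated in full; the proofs are below) =====
def Claim_equal_num_epochs_py : Prop := ∀ (tokens_per_epoch : Int) (seq_length : Int) (num_samples : Int) (add_extra_token : Int), Dom_num_epochs_py tokens_per_epoch seq_length num_samples add_extra_token → Pre_num_epochs_py tokens_per_epoch seq_length num_samples add_extra_token → Spec_num_epochs_py tokens_per_epoch seq_length num_samples add_extra_token (num_epochs_py tokens_per_epoch seq_length num_samples add_extra_token)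

-- ===== LEMMAS AND PROOFS =====

-- A's exit test at iteration k is exactly "k ≥ ceil((num_samples*seq_length+add_extra_token)/tokens_per_epoch)".
lemma cond_iff_ceil (T s n e : Int) (hp : (0 < T ∧ 0 < s) ∨ (T < 0 ∧ s < 0)) (k : Int) :
    (n ≤ PySem.Int.floordiv (k * T - e) s) ↔ (-(PySem.Int.floordiv (-(n * s + e)) T)) ≤ k := by
  rcases hp with ⟨hT, hs⟩ | ⟨hT, hs⟩
  · rw [PySem.Int.le_floordiv_iff_mul_le hs]
    obtain ⟨h1, h2⟩ := (PySem.Int.neg_floordiv_neg_eq_iff_of_pos hT).mp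
      (rfl : -(PySem.Int.floordiv (-(n * s + e)) T) = -(PySem.Int.floordiv (-(n * s + e)) T))
    set C := -(PySem.Int.floordiv (-(n * s + e)) T) with hC
    constructor
    · intro h
      -- (C-1)*T < n*s+e ≤ k*T ⇒ C-1 < k
      nlinarith
    · intro h
      nlinarith
  · have hfd : PySem.Int.floordiv (k * T - e) s = PySem.Int.floordiv (e - k * T) (-s) := by
      rw [← PySem.Int.floordiv_neg_neg (e - k * T) (-s)]; ring_nf
    have hfd2 : PySem.Int.floordiv (-(n * s + e)) T = PySem.Int.floordiv (n * s + e) (-T) := by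
      rw [← PySem.Int.floordiv_neg_neg (n * s + e) (-T)]; ring_nf
    rw [hfd, hfd2, PySem.Int.le_floordiv_iff_mul_le (by omega : (0:Int) < -s)]
    have hbr := PySem.Int.le_floordiv_iff_mul_le (a := n * s + e) (b := -T) (q := -k) (by omega)
    constructor
    · intro h
      have : -k ≤ PySem.Int.floordiv (n * s + e) (-T) := hbr.mpr (by nlinarith)
      omega
    · intro h
      have : (-k) * (-T) ≤ n * s + e := hbr.mp (by omega)
      nlinarith

-- The loop, started after j completed iterations (count j, total j*T), returns K = max 1 C.
lemma loop_eq (T s n e : Int) (hp : (0 < T ∧ 0 < s) ∨ (T < 0 ∧ s < 0)) :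
    ∀ (fuel : Nat) (j : Int), 0 ≤ j →
      j < max 1 (-(PySem.Int.floordiv (-(n * s + e)) T)) →
      max 1 (-(PySem.Int.floordiv (-(n * s + e)) T)) ≤ j + fuel →
      numEpochsLoop T s n e fuel j (j * T) = max 1 (-(PySem.Int.floordiv (-(n * s + e)) T)) := by
  intro fuel
  induction fuel with
  | zero => intro j _ hlt hle; exfalso; omega
  | succ m ih =>
      intro j hj hlt hle
      set C := -(PySem.Int.floordiv (-(n * s + e)) T) with hC
      have hcond : (n ≤ PySem.Int.floordiv ((j * T + T) - e) s) ↔ C ≤ j + 1 := by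
        have := cond_iff_ceil T s n e hp (j + 1)
        rwa [show (j + 1) * T = j * T + T by ring] at this
      simp only [numEpochsLoop]
      by_cases hdone : C ≤ j + 1
      · have : max 1 C = j + 1 := by omega
        rw [if_pos (hcond.mpr hdone)]
        omega
      · rw [if_neg (by rw [hcond]; omega)]
        have := ih (j + 1) (by omega) (by omega) (by push_cast at hle; omega)
        rw [show (j + 1) * T = j * T + T by ring] at this
        exact this

-- ceil((n*s+e)/T) is bounded by |n|*|s|+|e|+1 on the admitted sign combinations.
lemma ceil_le_fuel (T s n e : Int) (hp : (0 < T ∧ 0 < s) ∨ (T < 0 ∧ s < 0)) :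
    -(PySem.Int.floordiv (-(n * s + e)) T) ≤ (n.natAbs : Int) * s.natAbs + e.natAbs + 1 := by
  have habs : ((n * s).natAbs : Int) = (n.natAbs : Int) * s.natAbs := by
    rw [Int.natAbs_mul]; push_cast; ring
  have hM : n * s + e ≤ (n.natAbs : Int) * s.natAbs + e.natAbs := by
    have h1 : n * s ≤ (n.natAbs : Int) * s.natAbs := habs ▸ Int.le_natAbs
    have h2 : e ≤ (e.natAbs : Int) := Int.le_natAbs
    omega
  have hMlow : -((n.natAbs : Int) * s.natAbs + e.natAbs) ≤ n * s + e := by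
    have h1 : -((n.natAbs : Int) * s.natAbs) ≤ n * s := by
      have h := Int.le_natAbs (a := -(n * s))
      rw [Int.natAbs_neg, habs] at h
      linarith
    have h2 : -(e.natAbs : Int) ≤ e := by
      have h := Int.le_natAbs (a := -e)
      rw [Int.natAbs_neg] at h
      linarith
    linarith
  set B : Int := (n.natAbs : Int) * s.natAbs + e.natAbs with hB
  have hB0 : 0 ≤ B := by positivity
  rcases hp with ⟨hT, _⟩ | ⟨hT, _⟩
  · obtain ⟨h1, h2⟩ := (PySem.Int.neg_floordiv_neg_eq_iff_of_pos hT).mp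
      (rfl : -(PySem.Int.floordiv (-(n * s + e)) T) = -(PySem.Int.floordiv (-(n * s + e)) T))
    set C := -(PySem.Int.floordiv (-(n * s + e)) T)
    by_cases hc : C ≤ 0
    · omega
    · nlinarith
  · have hfd2 : PySem.Int.floordiv (-(n * s + e)) T = PySem.Int.floordiv (n * s + e) (-T) := by
      rw [← PySem.Int.floordiv_neg_neg (n * s + e) (-T)]; ring_nf
    rw [hfd2]
    obtain ⟨hlow, hhigh⟩ := (PySem.Int.floordiv_eq_iff_of_pos (a := n * s + e) (b := -T)
      (q := PySem.Int.floordiv (n * s + e) (-T)) (by omega)).mp rfl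
    set f := PySem.Int.floordiv (n * s + e) (-T)
    by_cases hc : 0 ≤ f
    · omega
    · have hstep : (f + 1) * (-T) ≤ f + 1 := by nlinarith
      have hM2 : n * s + e < f + 1 := lt_of_lt_of_le hhigh hstep
      linarith

-- ===== VERDICT (by name: the statement is the Claim_ definition above) =====
theorem num_epochs_py_spec : Claim_equal_num_epochs_py := by
  intro T s n e _ hp
  unfold Spec_num_epochs_py num_epochs_py num_epochs_py_alt
  have hloop := loop_eq T s n e hp (n.natAbs * s.natAbs + e.natAbs + 2) 0 le_rfl
  have hub := ceil_le_fuel T s n e hp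
  rw [show (0 : Int) * T = 0 by ring] at hloop
  refine hloop (by omega) ?_
  rw [show ((n.natAbs * s.natAbs + e.natAbs + 2 : Nat) : Int)
        = (n.natAbs : Int) * (s.natAbs : Int) + (e.natAbs : Int) + 2 from by push_cast; ring]
  have ha : (0 : Int) ≤ (n.natAbs : Int) * (s.natAbs : Int) := by positivity
  omega
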